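-- pv_equiv track=rewrite | github.com/staffanosp/Advent-of-Code | 2023/python/Day-03/Day_03.py | get_adj_coords
-- ===== SOURCE A (Python) =====
-- def get_adj_coords(start_x, end_x, y):
--     adj_coords = []
--
--     for adj_y in range(y - 1, y + 2):
--         if adj_y == y:
--             adj_coords.append((start_x - 1, y))
--             adj_coords.append((end_x + 1, y))
--
--         else:
--             for adj_x in range(start_x - 1, end_x + 2):
--                 adj_coords.append((adj_x, adj_y))
--
--     return adj_coords
-- ===== SOURCE B (Python) =====
-- def get_adj_coords(start_x, end_x, y):
--     # Single flat pass: decode a linear index k over the 3-row bounding box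
--     # via divmod, keeping middle-row cells only at the two edge columns.
--     w = end_x - start_x + 3
--     return [
--         (start_x - 1 + k % w, y - 1 + k // w)
--         for k in range(3 * w)
--         if k // w != 1 or k % w == 0 or k % w == w - 1
--     ]
-- ===== Notes on version B (the rewrite author's own statement) =====
-- stated objective: alternative
-- what changed: Replaces the nested row loops with branch by one flat pass over a single linear index k in range(3*w) decoded with divmod into (column, row), filtering out the number's own middle-row cells.
-- outside the precondition, e.g. on get_adj_coords(5, 0, 3): A returns [(4, 3), (1, 3)], B returns []
import Mathlib
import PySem

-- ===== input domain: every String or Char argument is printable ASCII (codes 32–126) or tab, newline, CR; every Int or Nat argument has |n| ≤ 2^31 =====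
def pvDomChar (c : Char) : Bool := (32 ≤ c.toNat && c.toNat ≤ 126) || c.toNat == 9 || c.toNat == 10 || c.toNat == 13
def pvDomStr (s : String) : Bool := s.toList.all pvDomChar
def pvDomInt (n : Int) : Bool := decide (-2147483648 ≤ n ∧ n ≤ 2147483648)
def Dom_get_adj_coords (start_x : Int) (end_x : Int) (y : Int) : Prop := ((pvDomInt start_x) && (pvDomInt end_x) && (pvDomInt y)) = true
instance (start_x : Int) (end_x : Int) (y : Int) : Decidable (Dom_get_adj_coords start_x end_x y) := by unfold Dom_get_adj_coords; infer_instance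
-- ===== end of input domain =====

-- B replaces A's nested row loops with one flat pass over a linear index decoded by divmod (alternative decomposition); equality proved on Pre_ (start_x ≤ end_x + 1, the natural non-inverted segments).


-- ===== PORT A =====
-- Literal port: outer loop over range(y-1, y+2); on adj_y == y append the two
-- side cells, otherwise inner loop over range(start_x-1, end_x+2) appending.
def get_adj_coords (start_x : Int) (end_x : Int) (y : Int) : List (Int × Int) :=
  (PySem.List.pyRange (y - 1) (y + 2) 1).foldl
    (fun adj_coords adj_y =>
      if adj_y = y then
        (adj_coords ++ [(start_x - 1, y)]) ++ [(end_x + 1, y)]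
      else
        (PySem.List.pyRange (start_x - 1) (end_x + 2) 1).foldl
          (fun acc adj_x => acc ++ [(adj_x, adj_y)]) adj_coords)
    []

-- ===== PORT B =====
-- Port of Source B: one flat comprehension over range(3*w), filtering by the
-- divmod-decoded position and mapping the index to a coordinate.
def get_adj_coords_alt (start_x : Int) (end_x : Int) (y : Int) : List (Int × Int) :=
  ((PySem.List.pyRange 0 (3 * (end_x - start_x + 3)) 1).filter
      (fun k => !(PySem.Int.floordiv k (end_x - start_x + 3) == 1)
        || PySem.Int.mod k (end_x - start_x + 3) == 0
        || PySem.Int.mod k (end_x - start_x + 3) == (end_x - start_x + 3) - 1)).map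
    (fun k => (start_x - 1 + PySem.Int.mod k (end_x - start_x + 3),
               y - 1 + PySem.Int.floordiv k (end_x - start_x + 3)))

-- ===== PRECONDITION & SPEC =====
-- Pre_ restricts to the task's natural domain: the number occupies columns
-- start_x..end_x, so an inverted segment (end_x < start_x - 1) is excluded;
-- there A still returns the two side cells (a leftover of its middle-row
-- branch, which runs regardless of the box being empty) while B's uniform
-- box is empty or a single cell.
def Pre_get_adj_coords (start_x : Int) (end_x : Int) (_y : Int) : Prop :=
  start_x ≤ end_x + 1
instance (start_x : Int) (end_x : Int) (y : Int) : Decidable (Pre_get_adj_coords start_x end_x y) := by unfold Pre_get_adj_coords; infer_instance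
def pvWitness_get_adj_coords : Int × Int × Int := (0, 2, 0)
def Spec_get_adj_coords (start_x : Int) (end_x : Int) (y : Int) (out : List (Int × Int)) : Prop := out = get_adj_coords_alt start_x end_x y
instance (start_x : Int) (end_x : Int) (y : Int) (out : List (Int × Int)) : Decidable (Spec_get_adj_coords start_x end_x y out) := by unfold Spec_get_adj_coords; infer_instance

-- ===== CLAIM =====
def Claim_equal_get_adj_coords : Prop := ∀ (start_x : Int) (end_x : Int) (y : Int), Dom_get_adj_coords start_x end_x y → Pre_get_adj_coords start_x end_x y → Spec_get_adj_coords start_x end_x y (get_adj_coords start_x end_x y)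

-- ===== LEMMAS AND PROOFS =====

-- range(y-1, y+2) is exactly the three rows [y-1, y, y+1]
theorem pyRange_three (y : Int) :
    PySem.List.pyRange (y - 1) (y + 2) 1 = [y - 1, y, y + 1] := by
  rw [PySem.List.pyRange_one_cons (by omega)]
  rw [show y - 1 + 1 = y by ring]
  rw [PySem.List.pyRange_one_cons (by omega)]
  rw [PySem.List.pyRange_one_cons (by omega)]
  rw [PySem.List.pyRange_one_eq_nil (by omega)]

-- divmod decoding of a linear index j*w + i, 0 ≤ i < w
theorem fd_decode (w i : Int) (j : Int) (hw : 0 < w) (h0 : 0 ≤ i) (h1 : i < w) :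
    PySem.Int.floordiv (j * w + i) w = j := by
  rw [PySem.Int.floordiv_eq_iff_of_pos hw]
  constructor <;> nlinarith

theorem md_decode (w i : Int) (j : Int) (hw : 0 < w) (h0 : 0 ≤ i) (h1 : i < w) :
    PySem.Int.mod (j * w + i) w = i := by
  have h := PySem.Int.floordiv_mul_add_mod (j * w + i) w
  rw [fd_decode w i j hw h0 h1] at h
  omega

-- the middle row keeps exactly the two edge indices
theorem filter_edges (m : Nat) :
    (List.range (m + 2)).filter (fun i => i == 0 || i == m + 1) = [0, m + 1] := by
  have : m + 2 = (m + 1) + 1 := rfl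
  rw [this, List.range_succ, List.range_succ_eq_map]
  rw [List.filter_append, List.filter_cons, List.filter_map]
  have hmid : ((List.range m).filter ((fun i => i == 0 || i == m + 1) ∘ Nat.succ)) = [] := by
    apply List.eq_nil_iff_forall_not_mem.mpr
    intro i hi
    simp only [List.mem_filter, List.mem_range, Function.comp, beq_iff_eq,
      Bool.or_eq_true] at hi
    omega
  rw [hmid]
  simp

-- canonical three-row form of A's result
theorem A_eq (sx ex y : Int) (m : Nat) (hm : ex - sx + 3 = (m : Int) + 2) :
    get_adj_coords sx ex y =
      ((List.range (m + 2)).map (fun (i : Nat) => (sx - 1 + (i : Int), y - 1)))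
        ++ [(sx - 1, y), (ex + 1, y)]
        ++ ((List.range (m + 2)).map (fun (i : Nat) => (sx - 1 + (i : Int), y + 1))) := by
  have hnw : (ex + 2 - (sx - 1)).toNat = m + 2 := by omega
  unfold get_adj_coords
  rw [pyRange_three]
  simp only [List.foldl_cons, List.foldl_nil,
    if_neg (show y - 1 ≠ y by omega), if_true,
    if_neg (show y + 1 ≠ y by omega),
    PySem.List.foldl_append_singleton_eq_map]
  rw [PySem.List.pyRange_one (sx - 1) (ex + 2), hnw]
  simp only [List.map_map, List.append_assoc, List.nil_append, List.cons_append]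
  rfl

-- canonical three-row form of B's result
theorem B_eq (sx ex y : Int) (m : Nat) (hm : ex - sx + 3 = (m : Int) + 2) :
    get_adj_coords_alt sx ex y =
      ((List.range (m + 2)).map (fun (i : Nat) => (sx - 1 + (i : Int), y - 1)))
        ++ [(sx - 1, y), (ex + 1, y)]
        ++ ((List.range (m + 2)).map (fun (i : Nat) => (sx - 1 + (i : Int), y + 1))) := by
  have hw : (0 : Int) < ex - sx + 3 := by omega
  have hn3 : (3 * (ex - sx + 3) - 0).toNat = m + 2 + (m + 2) + (m + 2) := by omega
  unfold get_adj_coords_alt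
  rw [PySem.List.pyRange_one 0 (3 * (ex - sx + 3)), hn3]
  rw [List.range_add, List.range_add]
  simp only [List.map_append, List.map_map, List.filter_append, List.filter_map]
  have row0 : ∀ i ∈ List.range (m + 2),
      ((fun k => !PySem.Int.floordiv k (ex - sx + 3) == 1
          || PySem.Int.mod k (ex - sx + 3) == 0
          || PySem.Int.mod k (ex - sx + 3) == ex - sx + 3 - 1) ∘
        (fun k : Nat => (0 : Int) + ↑k)) i = true := by
    intro i hi
    simp only [List.mem_range] at hi
    simp only [Function.comp_apply]
    rw [show (0 : Int) + ((i : Nat) : Int) = 0 * (ex - sx + 3) + (i : Int) from by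
      ring]
    rw [fd_decode _ _ _ hw (by omega) (by omega)]
    simp
  have row1 : ∀ i ∈ List.range (m + 2),
      ((fun k => !PySem.Int.floordiv k (ex - sx + 3) == 1
          || PySem.Int.mod k (ex - sx + 3) == 0
          || PySem.Int.mod k (ex - sx + 3) == ex - sx + 3 - 1) ∘
        (fun k : Nat => (0 : Int) + ↑k) ∘ (fun x : Nat => m + 2 + x)) i
      = (i == 0 || i == m + 1) := by
    intro i hi
    simp only [List.mem_range] at hi
    simp only [Function.comp_apply]
    rw [show (0 : Int) + ((m + 2 + i : Nat) : Int) = 1 * (ex - sx + 3) + (i : Int) from by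
      push_cast; omega]
    rw [fd_decode _ _ _ hw (by omega) (by omega),
      md_decode _ _ _ hw (by omega) (by omega)]
    rw [Bool.eq_iff_iff]
    simp only [Bool.or_eq_true, beq_iff_eq, Bool.not_true,
      beq_self_eq_true, Bool.false_or]
    omega
  have row2 : ∀ i ∈ List.range (m + 2),
      ((fun k => !PySem.Int.floordiv k (ex - sx + 3) == 1
          || PySem.Int.mod k (ex - sx + 3) == 0
          || PySem.Int.mod k (ex - sx + 3) == ex - sx + 3 - 1) ∘
        (fun k : Nat => (0 : Int) + ↑k) ∘ (fun x : Nat => m + 2 + (m + 2) + x)) i = true := by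
    intro i hi
    simp only [List.mem_range] at hi
    simp only [Function.comp_apply]
    rw [show (0 : Int) + ((m + 2 + (m + 2) + i : Nat) : Int)
        = 2 * (ex - sx + 3) + (i : Int) from by push_cast; omega]
    rw [fd_decode _ _ _ hw (by omega) (by omega)]
    simp
  rw [List.filter_congr row0, List.filter_congr row1, List.filter_congr row2]
  simp only [List.filter_true]
  rw [filter_edges]
  congr 1
  · congr 1
    · -- row above
      apply List.map_congr_left
      intro i hi
      simp only [List.mem_range] at hi
      simp only [Function.comp_apply]
      rw [show (0 : Int) + ((i : Nat) : Int) = 0 * (ex - sx + 3) + (i : Int) from by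
        ring]
      rw [fd_decode _ _ _ hw (by omega) (by omega),
        md_decode _ _ _ hw (by omega) (by omega)]
      simp
    · -- middle row: the two side cells
      simp only [List.map_cons, List.map_nil, Function.comp_apply]
      rw [show (0 : Int) + ((m + 2 + 0 : Nat) : Int)
          = 1 * (ex - sx + 3) + (0 : Int) from by push_cast; omega]
      rw [show (0 : Int) + ((m + 2 + (m + 1) : Nat) : Int)
          = 1 * (ex - sx + 3) + ((ex - sx + 3 - 1) : Int) from by push_cast; omega]
      rw [fd_decode _ _ _ hw (by omega) (by omega),
        md_decode _ _ _ hw (by omega) (by omega),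
        fd_decode _ _ _ hw (by omega) (by omega),
        md_decode _ _ _ hw (by omega) (by omega)]
      simp only [List.cons.injEq, Prod.mk.injEq, and_true]
      omega
  · -- row below
    apply List.map_congr_left
    intro i hi
    simp only [List.mem_range] at hi
    simp only [Function.comp_apply]
    rw [show (0 : Int) + ((m + 2 + (m + 2) + i : Nat) : Int)
        = 2 * (ex - sx + 3) + (i : Int) from by push_cast; omega]
    rw [fd_decode _ _ _ hw (by omega) (by omega),
      md_decode _ _ _ hw (by omega) (by omega)]
    simp only [Prod.mk.injEq]
    exact ⟨trivial, by ring⟩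

-- ===== VERDICT =====
theorem get_adj_coords_spec : Claim_equal_get_adj_coords := by
  intro sx ex y _ hpre
  unfold Pre_get_adj_coords at hpre
  show get_adj_coords sx ex y = get_adj_coords_alt sx ex y
  obtain ⟨m, hm⟩ : ∃ m : Nat, ex - sx + 3 = (m : Int) + 2 := by
    refine ⟨(ex - sx + 1).toNat, ?_⟩; omega
  rw [A_eq sx ex y m hm, B_eq sx ex y m hm]
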